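-- pv_equiv track=rewrite | github.com/yanivm96/ogrdb | sequence_format.py | format_nuc_sequence
-- ===== SOURCE A (Python) =====
-- def chunks(l, n):
--     " Yield successive n-sized chunks from l."
--     for i in range(0, len(l), n):
--         yield l[i:i + n]
--
-- def format_nuc_sequence(seq, width):
--     ind = 1
--     ret = ''
--
--     if seq is None or len(seq) == 0:
--         return ''
--
--     for frag in chunks(seq, width):
--         ret += '%-5d' % ind
--         if len(frag) > 10:
--             ret += ' '*(len(frag)-10) + '%5d' % (ind + len(frag) - 1)
--         ind += len(frag)
--         ret += '\n' + frag + '\n\n'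
--
--     return ret
-- ===== SOURCE B (Python) =====
-- def format_nuc_sequence(seq, width):
--     if seq is None or len(seq) == 0 or width <= 0:
--         return ''
--
--     def block(start, frag):
--         head = '%-5d' % start
--         if len(frag) > 10:
--             head += ' ' * (len(frag) - 10) + '%5d' % (start + len(frag) - 1)
--         return head + '\n' + frag + '\n\n'
--
--     parts = []
--     buf = ''
--     start = 1
--     for ch in seq:               # single streaming pass, no index arithmetic, no slicing
--         buf += ch
--         if len(buf) == width:
--             parts.append(block(start, buf))
--             start += width
--             buf = ''
--     if buf:
--         parts.append(block(start, buf))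
--     return ''.join(parts)
-- ===== Notes on version B (the rewrite author's own statement) =====
-- stated objective: alternative
-- what changed: Replaced A's chunk generator (range-stride slicing) and string += accumulation by a single character-streaming pass that grows a buffer and flushes a formatted block each time the buffer reaches width, joining the collected blocks at the end.
import Mathlib
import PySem

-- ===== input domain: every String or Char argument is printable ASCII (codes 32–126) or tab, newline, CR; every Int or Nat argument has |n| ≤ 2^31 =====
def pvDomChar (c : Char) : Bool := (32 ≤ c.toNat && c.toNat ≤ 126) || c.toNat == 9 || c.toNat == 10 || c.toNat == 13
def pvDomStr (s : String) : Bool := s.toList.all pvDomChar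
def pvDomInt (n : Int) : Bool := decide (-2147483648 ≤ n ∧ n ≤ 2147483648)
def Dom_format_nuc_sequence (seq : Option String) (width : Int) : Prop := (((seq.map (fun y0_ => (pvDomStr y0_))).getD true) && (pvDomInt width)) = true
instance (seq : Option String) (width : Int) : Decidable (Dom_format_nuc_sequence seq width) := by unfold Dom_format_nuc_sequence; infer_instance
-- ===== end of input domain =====

-- B replaces A's chunk generator (range-stride slicing) + string += accumulation by a single
-- character-streaming pass with a buffer flushed each time it reaches width (objective: alternative).

-- ===== PORT A =====
-- '%-5d' % n  (left-justified, min width 5)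
def pvFmtL5 (n : Int) : List Char :=
  let s := PySem.Int.toChars n
  s ++ List.replicate (5 - s.length) ' '

-- '%5d' % n  (right-justified, min width 5)
def pvFmtR5 (n : Int) : List Char :=
  let s := PySem.Int.toChars n
  List.replicate (5 - s.length) ' ' ++ s

-- A's helper chunks(l, n): successive n-sized slices l[i:i+n] for i in range(0, len(l), n)
def chunksA (l : List Char) (n : Int) : List (List Char) :=
  (PySem.List.pyRange 0 l.length n).map (fun i => PySem.List.slice l (some i) (some (i + n)))

-- the body of A's 'for frag in chunks(seq, width)' loop, threading (ind, ret)
def stepA (st : Int × List Char) (frag : List Char) : Int × List Char :=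
  let ret := st.2 ++ pvFmtL5 st.1
  let ret := if frag.length > 10 then
      ret ++ List.replicate (frag.length - 10) ' ' ++ pvFmtR5 (st.1 + frag.length - 1)
    else ret
  (st.1 + frag.length, ret ++ '\n' :: frag ++ ['\n', '\n'])

def format_nuc_sequence (seq : Option String) (width : Int) : String :=
  match seq with
  | none => ""
  | some s =>
    if s.toList.length = 0 then "" else
    String.ofList ((chunksA s.toList width).foldl stepA (1, [])).2

-- ===== PORT B =====
-- B's local helper block(start, frag): one formatted block
def blockB (start : Int) (frag : List Char) : List Char :=
  let head := pvFmtL5 start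
  let head := if frag.length > 10 then
      head ++ List.replicate (frag.length - 10) ' ' ++ pvFmtR5 (start + frag.length - 1)
    else head
  head ++ '\n' :: frag ++ ['\n', '\n']

-- B's loop body: state (parts, buf, start); append ch to buf, flush a block when len(buf) == width
def stepB (width : Int) (st : List (List Char) × List Char × Int) (c : Char) :
    List (List Char) × List Char × Int :=
  let buf := st.2.1 ++ [c]
  if (buf.length : Int) = width then
    (st.1 ++ [blockB st.2.2 buf], [], st.2.2 + width)
  else
    (st.1, buf, st.2.2)

def format_nuc_sequence_alt (seq : Option String) (width : Int) : String :=
  match seq with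
  | none => ""
  | some s =>
    if s.toList.length = 0 ∨ width ≤ 0 then "" else
    let st := s.toList.foldl (stepB width) ([], [], 1)
    let parts := if st.2.1 ≠ [] then st.1 ++ [blockB st.2.2 st.2.1] else st.1
    String.ofList parts.flatten

-- ===== PRECONDITION & SPEC =====
-- Pre_ excludes only width = 0 with a nonempty sequence: there range(0, len(seq), 0) raises ValueError in A.
def Pre_format_nuc_sequence (seq : Option String) (width : Int) : Prop :=
  width ≠ 0 ∨ seq = none ∨ seq = some ""
instance (seq : Option String) (width : Int) : Decidable (Pre_format_nuc_sequence seq width) := by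
  unfold Pre_format_nuc_sequence; infer_instance

def pvWitness_format_nuc_sequence : Option String × Int := (some "ACGTACGTACGTA", 4)

def Spec_format_nuc_sequence (seq : Option String) (width : Int) (out : String) : Prop := out = format_nuc_sequence_alt seq width
instance (seq : Option String) (width : Int) (out : String) : Decidable (Spec_format_nuc_sequence seq width out) := by unfold Spec_format_nuc_sequence; infer_instance

-- ===== CLAIM (what is proved, stated in full; the proofs are below) =====
def Claim_equal_format_nuc_sequence : Prop := ∀ (seq : Option String) (width : Int), Dom_format_nuc_sequence seq width → Pre_format_nuc_sequence seq width → Spec_format_nuc_sequence seq width (format_nuc_sequence seq width)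

-- ===== LEMMAS AND PROOFS =====

-- proof-only intermediate: the output as a take/drop recursion over the characters
def blocksTD (wN : Nat) (start : Int) (cs : List Char) : List Char :=
  match cs with
  | [] => []
  | c :: rest =>
    if _h : wN = 0 then [] else
      blockB start ((c :: rest).take wN) ++
        blocksTD wN (start + ((c :: rest).take wN).length) ((c :: rest).drop wN)
termination_by cs.length
decreasing_by simp only [List.length_drop, List.length_cons]; omega

lemma stepA_eq (s : Int) (ret frag : List Char) :
    stepA (s, ret) frag = (s + frag.length, ret ++ blockB s frag) := by
  simp only [stepA, blockB]
  split_ifs with h <;> simp [List.append_assoc]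

-- one chunk of B's streaming loop: starting below width, either the input is absorbed into the
-- buffer or the buffer fills to width and one block is flushed
lemma fillChunk (w : Int) (wN : Nat) (hw : w = (wN : Int)) :
    ∀ (cs buf : List Char) (parts : List (List Char)) (start : Int), buf.length < wN →
    cs.foldl (stepB w) (parts, buf, start) =
      if buf.length + cs.length < wN then (parts, buf ++ cs, start)
      else (cs.drop (wN - buf.length)).foldl (stepB w)
        (parts ++ [blockB start (buf ++ cs.take (wN - buf.length))], [], start + w) := by
  intro cs
  induction cs with
  | nil =>
    intro buf parts start hb
    simp only [List.foldl_nil, List.length_nil, Nat.add_zero, List.append_nil]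
    rw [if_pos hb]
  | cons c cs ih =>
    intro buf parts start hb
    simp only [List.foldl_cons]
    by_cases hfull : buf.length + 1 = wN
    · have hcond : ((buf.length : Int) + 1) = w := by omega
      rw [show stepB w (parts, buf, start) c
            = (parts ++ [blockB start (buf ++ [c])], [], start + w) by
          simp [stepB, hcond]]
      rw [if_neg (by simp; omega)]
      have h1 : wN - buf.length = 1 := by omega
      rcases cs with _ | ⟨d, ds⟩
      · simp [h1, hw]
      · simp [h1]
    · have hcond : ¬ (((buf.length : Int) + 1) = w) := by omega
      rw [show stepB w (parts, buf, start) c = (parts, buf ++ [c], start) by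
          simp [stepB, hcond]]
      rw [ih (buf ++ [c]) parts start (by simp; omega)]
      by_cases hs : buf.length + 1 + cs.length < wN
      · rw [if_pos (by simpa using hs), if_pos (by simp; omega)]
        simp
      · rw [if_neg (by simpa using hs), if_neg (by simp; omega)]
        have hk : wN - buf.length = (wN - (buf ++ [c]).length) + 1 := by simp; omega
        rw [hk]
        simp [List.take_succ_cons, List.drop_succ_cons, List.append_assoc]

-- B's streaming fold (with flush of the trailing buffer) computes blocksTD
lemma foldB_td_fuel (w : Int) (wN : Nat) (hw : w = (wN : Int)) (hpos : 0 < wN) :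
    ∀ (n : Nat) (cs : List Char), cs.length ≤ n →
    ∀ (parts : List (List Char)) (start : Int),
    (let st := cs.foldl (stepB w) (parts, [], start)
     (if st.2.1 ≠ [] then st.1 ++ [blockB st.2.2 st.2.1] else st.1).flatten)
      = parts.flatten ++ blocksTD wN start cs := by
  intro n
  induction n with
  | zero =>
    intro cs hcs parts start
    have : cs = [] := List.eq_nil_of_length_eq_zero (by omega)
    subst this
    simp [blocksTD]
  | succ n ih =>
    intro cs hcs parts start
    rcases cs with _ | ⟨c, rest⟩
    · simp [blocksTD]
    · simp only [List.length_cons] at hcs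
      rw [fillChunk w wN hw _ [] parts start (by simp only [List.length_nil]; omega)]
      simp only [List.nil_append, List.length_nil, Nat.zero_add, Nat.sub_zero]
      have hwne : wN ≠ 0 := by omega
      by_cases hsmall : (c :: rest).length < wN
      · rw [if_pos hsmall]
        have hdrop : (c :: rest).drop wN = [] := by
          apply List.drop_eq_nil_of_le; omega
        have htake : (c :: rest).take wN = c :: rest := by
          apply List.take_of_length_le; omega
        conv_rhs => rw [blocksTD]
        rw [dif_neg hwne, hdrop, htake]
        simp [blocksTD, List.flatten_append]
      · rw [if_neg hsmall]
        simp only [List.length_cons] at hsmall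
        have hlen : ((c :: rest).take wN).length = wN := by
          simp only [List.length_take, List.length_cons]
          omega
        have hrec := ih ((c :: rest).drop wN)
          (by simp only [List.length_drop, List.length_cons]; omega)
          (parts ++ [blockB start ((c :: rest).take wN)]) (start + w)
        simp only at hrec
        rw [hrec]
        have hsw : start + w = start + (((c :: rest).take wN).length : Int) := by
          rw [hlen, hw]
        rw [hsw]
        conv_rhs => rw [blocksTD]
        rw [dif_neg hwne]
        simp [List.flatten_append, List.append_assoc]

lemma foldB_td (w : Int) (wN : Nat) (hw : w = (wN : Int)) (hpos : 0 < wN)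
    (cs : List Char) (parts : List (List Char)) (start : Int) :
    (let st := cs.foldl (stepB w) (parts, [], start)
     (if st.2.1 ≠ [] then st.1 ++ [blockB st.2.2 st.2.1] else st.1).flatten)
      = parts.flatten ++ blocksTD wN start cs :=
  foldB_td_fuel w wN hw hpos cs.length cs le_rfl parts start

-- A's fold over the range-indexed slices computes blocksTD on the suffix
lemma foldA_td (cs : List Char) (w : Int) (wN : Nat) (hw : w = (wN : Int)) (hpos : 0 < wN) :
    ∀ (m : Nat) (a : Int) (ret : List Char), 0 ≤ a →
    ((cs.length : Int) ≤ a + w * m) →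
    (0 < m → a + w * ((m : Int) - 1) < (cs.length : Int)) →
    (List.foldl stepA (a + 1, ret)
        (((List.range m).map (fun (k : Nat) => a + w * (k : Int))).map
          (fun i => PySem.List.slice cs (some i) (some (i + w))))).2
      = ret ++ blocksTD wN (a + 1) (cs.drop a.toNat) := by
  intro m
  induction m with
  | zero =>
    intro a ret ha hle _
    have : cs.drop a.toNat = [] := by
      apply List.drop_eq_nil_of_le; omega
    simp [this, blocksTD]
  | succ m ihm =>
    intro a ret ha hle hlt
    have hrange : (List.range (m + 1)).map (fun (k : Nat) => a + w * (k : Int))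
        = a :: (List.range m).map (fun (k : Nat) => (a + w) + w * (k : Int)) := by
      rw [List.range_succ_eq_map, List.map_cons, List.map_map]
      refine congrArg₂ _ (by simp) (List.map_congr_left ?_)
      intro x _; simp only [Function.comp]; push_cast; ring
    have halt : a < (cs.length : Int) := by
      have := hlt (by omega)
      push_cast at this
      nlinarith [hw ▸ (show (0:Int) < (wN:Int) by exact_mod_cast hpos)]
    have hslice : PySem.List.slice cs (some a) (some (a + w))
        = (cs.drop a.toNat).take wN := by
      rw [PySem.List.slice_toNat cs ha (by omega)]
      congr 1
      omega
    have hsuffne : cs.drop a.toNat ≠ [] := by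
      intro hnil
      have := congrArg List.length hnil
      simp at this
      omega
    rw [hrange]
    simp only [List.map_cons, List.foldl_cons]
    rw [hslice, stepA_eq]
    rcases Nat.eq_zero_or_pos m with hm | hm
    · subst hm
      simp only [List.range_zero, List.map_nil, List.foldl_nil]
      -- last (possibly short) chunk: the remaining suffix fits within one chunk
      have hdrop : (cs.drop a.toNat).drop wN = [] := by
        apply List.drop_eq_nil_of_le
        simp only [List.length_drop]
        push_cast at hle
        omega
      rcases hcs : cs.drop a.toNat with _ | ⟨c, r⟩
      · exact absurd hcs hsuffne
      · rw [blocksTD]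
        rw [dif_neg (by omega)]
        rw [← hcs, hdrop]
        simp [blocksTD]
    · -- full chunk, then recurse
      have hfull : ((cs.drop a.toNat).take wN).length = wN := by
        have := hlt (by omega)
        simp only [List.length_take, List.length_drop]
        push_cast at this
        have hwpos : (0:Int) < w := by rw [hw]; exact_mod_cast hpos
        have : a + w ≤ (cs.length : Int) := by nlinarith
        omega
      have hstate : a + 1 + (((cs.drop a.toNat).take wN).length : Int) = (a + w) + 1 := by
        rw [hfull, hw]; ring
      rw [hstate]
      have hdropdrop : cs.drop (a + w).toNat = (cs.drop a.toNat).drop wN := by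
        rw [List.drop_drop]
        congr 1
        omega
      have hrec := ihm (a + w) (ret ++ blockB (a + 1) ((cs.drop a.toNat).take wN))
        (by have : (0:Int) ≤ w := by rw [hw]; positivity
            omega)
        (by push_cast at hle ⊢; linarith)
        (by intro _
            have := hlt (by omega)
            push_cast at this ⊢
            linarith)
      rw [hrec, hdropdrop]
      rcases hcs : cs.drop a.toNat with _ | ⟨c, r⟩
      · exact absurd hcs hsuffne
      · conv_rhs => rw [blocksTD]
        rw [dif_neg (by omega)]
        rw [← hcs, hfull]
        simp only [List.append_assoc, hw]
        have harith : a + (wN : Int) + 1 = a + 1 + (wN : Int) := by ring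
        rw [harith]

-- pyRange with a negative step and a nonnegative stop is empty
lemma pyRange_neg_empty (n w : Int) (hn : 0 ≤ n) (hw : w < 0) :
    PySem.List.pyRange 0 n w = [] := by
  unfold PySem.List.pyRange
  rw [if_neg (by omega)]
  have h1 : ¬ (0 < w) := by omega
  have h2 : ¬ (n < 0) := by omega
  simp [h1, h2]

theorem format_nuc_sequence_spec_aux (seq : Option String) (width : Int)
    (hpre : Pre_format_nuc_sequence seq width) :
    format_nuc_sequence seq width = format_nuc_sequence_alt seq width := by
  match seq with
  | none => rfl
  | some s =>
    simp only [format_nuc_sequence, format_nuc_sequence_alt]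
    by_cases hz : s.toList.length = 0
    · simp [hz]
    · rw [if_neg hz]
      set cs := s.toList with hcs
      have hn : 0 < (cs.length : Int) := by
        have := Nat.pos_of_ne_zero hz; omega
      have hw0 : width ≠ 0 := by
        rcases hpre with h | h | h
        · exact h
        · simp at h
        · exfalso; apply hz
          have hs : s = "" := by injection h
          rw [hcs, hs]; rfl
      rcases lt_or_gt_of_ne hw0 with hneg | hpos
      · rw [if_pos (Or.inr (by omega))]
        simp [chunksA, pyRange_neg_empty _ _ (by omega : (0:Int) ≤ (cs.length : Int)) hneg]
      · rw [if_neg (by push Not; exact ⟨hz, by omega⟩)]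
        set wN := width.toNat with hwN
        have hw : width = (wN : Int) := by omega
        have hposN : 0 < wN := by omega
        have hr := PySem.List.pyRange_of_pos 0 (cs.length : Int) hpos
        rw [if_pos hn] at hr
        set q : Int := ((cs.length : Int) - 0 + width - 1) / width with hq
        have hdm := Int.mul_ediv_add_emod ((cs.length : Int) - 0 + width - 1) width
        have hm0 : 0 ≤ ((cs.length : Int) - 0 + width - 1) % width := Int.emod_nonneg _ (by omega)
        have hm1 : ((cs.length : Int) - 0 + width - 1) % width < width := Int.emod_lt_of_pos _ hpos
        have hq0 : 0 < q := by nlinarith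
        have hle : (cs.length : Int) ≤ 0 + width * q.toNat := by
          rw [Int.toNat_of_nonneg (by omega)]
          nlinarith
        have hlt : 0 < q.toNat → (0:Int) + width * ((q.toNat : Int) - 1) < (cs.length : Int) := by
          intro _
          rw [Int.toNat_of_nonneg (by omega)]
          nlinarith
        have hA := foldA_td cs width wN hw hposN q.toNat 0 [] le_rfl hle hlt
        have hB := foldB_td width wN hw hposN cs [] 1
        simp only [chunksA, hr]
        simp only [zero_add, Int.toNat_zero, List.drop_zero, List.nil_append] at hA
        simp only [zero_add]
        rw [hA]
        simp only [List.flatten_nil, List.nil_append] at hB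
        rw [← hB]

theorem pvWitness_ok :
    Dom_format_nuc_sequence pvWitness_format_nuc_sequence.1 pvWitness_format_nuc_sequence.2 ∧
    Pre_format_nuc_sequence pvWitness_format_nuc_sequence.1 pvWitness_format_nuc_sequence.2 := by
  constructor <;> decide

-- ===== VERDICT (by name: the statement is the Claim_ definition above) =====
theorem format_nuc_sequence_spec : Claim_equal_format_nuc_sequence := by
  intro seq width _ hpre
  exact format_nuc_sequence_spec_aux seq width hpre
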